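-- pv_equiv track=rewrite | github.com/rlee32/election-fraud-nevada | plot_turnout_by_age.py | organize_voters
-- ===== SOURCE A (Python) =====
-- from typing import Dict, Set
--
-- def organize_voters(voters: Dict[str, any]):
--     """Organizes voters by county and age. """
--     result = {}
--     for i in voters:
--         v = voters[i]
--         c = v['county']
--         if c not in result:
--             result[c] = {}
--         a = v['age']
--         if a not in result[c]:
--             result[c][a] = 0
--         result[c][a] += 1
--     return result
-- ===== SOURCE B (Python) =====
-- def organize_voters(voters):
--     """Organizes voters by county and age."""
--     # Pass 1: flat count table keyed by (county, age).
--     flat = {}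
--     for v in voters.values():
--         key = (v['county'], v['age'])
--         flat[key] = flat.get(key, 0) + 1
--     # Pass 2: restructure the flat table into the nested dict.
--     result = {}
--     for (county, age), count in flat.items():
--         if county not in result:
--             result[county] = {}
--         result[county][age] = count
--     return result
-- ===== Notes on version B (the rewrite author's own statement) =====
-- stated objective: alternative
-- what changed: B replaces A's on-the-fly nested-dict counting with a one-pass flat count table keyed by (county, age) followed by a second regrouping pass that builds the nested result from the flat table.
import Mathlib
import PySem

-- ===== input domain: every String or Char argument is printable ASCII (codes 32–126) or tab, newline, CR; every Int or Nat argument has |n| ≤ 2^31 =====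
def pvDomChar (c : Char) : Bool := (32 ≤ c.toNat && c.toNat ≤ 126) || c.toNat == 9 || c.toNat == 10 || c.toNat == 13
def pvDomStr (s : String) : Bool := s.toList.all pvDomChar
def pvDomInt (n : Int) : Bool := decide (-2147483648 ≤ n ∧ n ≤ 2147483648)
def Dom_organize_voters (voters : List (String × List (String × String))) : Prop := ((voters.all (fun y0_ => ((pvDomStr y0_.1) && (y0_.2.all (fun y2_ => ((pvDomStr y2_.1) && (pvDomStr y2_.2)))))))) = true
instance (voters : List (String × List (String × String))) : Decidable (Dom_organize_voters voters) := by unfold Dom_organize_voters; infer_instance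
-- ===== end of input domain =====

-- B builds a flat (county, age) count table in one pass and regroups it into the nested dict
-- in a second pass, instead of A's on-the-fly nested-dict counting (objective: alternative).


-- ===== PORT A =====
-- 'for i in voters: v = voters[i]; …' — each key is looked up in the dict; missing
-- 'county'/'age' keys are KeyErrors (none), excluded by Pre_ (the fold then skips).
def organize_voters (voters : List (String × List (String × String))) : List (String × List (String × Int)) :=
  let result : PySem.Dict String (PySem.Dict String Int) :=
    voters.foldl (fun result iv =>
      match (PySem.Dict.mk voters).get? iv.1 with
      | none => result
      | some v =>
        match (PySem.Dict.mk v).get? "county" with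
        | none => result
        | some c =>
          let result := if result.contains c then result else result.insert c PySem.Dict.empty
          match (PySem.Dict.mk v).get? "age" with
          | none => result
          | some a =>
            let inner := result.getD c PySem.Dict.empty
            let inner := if inner.contains a then inner else inner.insert a 0
            result.insert c (inner.insert a (inner.getD a 0 + 1))) PySem.Dict.empty
  result.items.map (fun p => (p.1, p.2.items))

-- ===== PORT B =====
-- pass 1: flat count table keyed by (county, age); pass 2: regroup into the nested dict.
def organize_voters_alt (voters : List (String × List (String × String))) : List (String × List (String × Int)) :=
  let flat : PySem.Dict (String × String) Int :=
    voters.foldl (fun flat kv =>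
      match (PySem.Dict.mk kv.2).get? "county", (PySem.Dict.mk kv.2).get? "age" with
      | some c, some a => flat.insert (c, a) (flat.getD (c, a) 0 + 1)
      | _, _ => flat) PySem.Dict.empty
  let result : PySem.Dict String (PySem.Dict String Int) :=
    flat.items.foldl (fun result p =>
      let result := if result.contains p.1.1 then result else result.insert p.1.1 PySem.Dict.empty
      result.insert p.1.1 ((result.getD p.1.1 PySem.Dict.empty).insert p.1.2 p.2)) PySem.Dict.empty
  result.items.map (fun p => (p.1, p.2.items))

-- ===== PRECONDITION & SPEC =====
-- Pre_ excludes voter records without a 'county' or 'age' key (A raises KeyError there), and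
-- association lists with duplicate outer keys, which do not represent any Python dict input.
def Pre_organize_voters (voters : List (String × List (String × String))) : Prop :=
  (voters.map (·.1)).Nodup ∧ ∀ kv ∈ voters, "county" ∈ kv.2.map (·.1) ∧ "age" ∈ kv.2.map (·.1)
instance (voters : List (String × List (String × String))) : Decidable (Pre_organize_voters voters) := by unfold Pre_organize_voters; infer_instance
def pvWitness_organize_voters : (List (String × List (String × String))) :=
  [("v1", [("county", "Clark"), ("age", "30")]), ("v2", [("county", "Clark"), ("age", "30")]), ("v3", [("county", "Nye"), ("age", "41")])]
def Spec_organize_voters (voters : List (String × List (String × String))) (out : List (String × List (String × Int))) : Prop := out = organize_voters_alt voters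
instance (voters : List (String × List (String × String))) (out : List (String × List (String × Int))) : Decidable (Spec_organize_voters voters out) := by unfold Spec_organize_voters; infer_instance

-- ===== CLAIM (what is proved, stated in full; the proofs are below) =====
def Claim_equal_organize_voters : Prop := ∀ (voters : List (String × List (String × String))), Dom_organize_voters voters → Pre_organize_voters voters → Spec_organize_voters voters (organize_voters voters)

-- ===== LEMMAS AND PROOFS =====

-- the per-voter (county, age) pair, under Pre_ (both lookups succeed)
def pvExt (kv : String × List (String × String)) : String × String :=
  (((PySem.Dict.mk kv.2).get? "county").getD "", ((PySem.Dict.mk kv.2).get? "age").getD "")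

-- A's loop body, simplified: bump the (county, age) count in the nested dict
def pvBumpI (I : PySem.Dict String Int) (a : String) : PySem.Dict String Int :=
  I.insert a (I.getD a 0 + 1)
def pvBump (R : PySem.Dict String (PySem.Dict String Int)) (p : String × String) :
    PySem.Dict String (PySem.Dict String Int) :=
  R.insert p.1 (pvBumpI (R.getD p.1 PySem.Dict.empty) p.2)

-- B's pass-1 and pass-2 loop bodies, simplified; pvSetp overwrites one (c, a) slot
def pvFlatStep (d : PySem.Dict (String × String) Int) (p : String × String) : PySem.Dict (String × String) Int :=
  d.insert p (d.getD p 0 + 1)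
def pvRegroupStep (R : PySem.Dict String (PySem.Dict String Int)) (q : (String × String) × Int) :
    PySem.Dict String (PySem.Dict String Int) :=
  R.insert q.1.1 ((R.getD q.1.1 PySem.Dict.empty).insert q.1.2 q.2)
def pvSetp (R : PySem.Dict String (PySem.Dict String Int)) (p : String × String) (w : Int) :
    PySem.Dict String (PySem.Dict String Int) :=
  R.insert p.1 ((R.getD p.1 PySem.Dict.empty).insert p.2 w)

theorem pv_stepA_eq_bump (R : PySem.Dict String (PySem.Dict String Int)) (c a : String) :
    (let R1 := if R.contains c then R else R.insert c PySem.Dict.empty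
     let I := R1.getD c PySem.Dict.empty
     let I := if I.contains a then I else I.insert a 0
     R1.insert c (I.insert a (I.getD a 0 + 1))) = pvBump R (c, a) := by
  by_cases hc : R.contains c = true
  · by_cases ha : (R.getD c PySem.Dict.empty).contains a = true
    · simp [hc, ha, pvBump, pvBumpI]
    · rw [Bool.not_eq_true] at ha
      simp [hc, ha, pvBump, pvBumpI, PySem.Dict.getD_insert_self, PySem.Dict.insert_insert_self,
            PySem.Dict.getD_of_not_contains _ _ ha]
  · rw [Bool.not_eq_true] at hc
    simp [hc, pvBump, pvBumpI, PySem.Dict.getD_insert_self, PySem.Dict.insert_insert_self,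
          PySem.Dict.getD_of_not_contains _ _ hc, PySem.Dict.contains_empty]

theorem pv_stepB_eq_regroupStep (R : PySem.Dict String (PySem.Dict String Int)) (q : (String × String) × Int) :
    (let R1 := if R.contains q.1.1 then R else R.insert q.1.1 PySem.Dict.empty
     R1.insert q.1.1 ((R1.getD q.1.1 PySem.Dict.empty).insert q.1.2 q.2)) = pvRegroupStep R q := by
  by_cases hc : R.contains q.1.1 = true
  · simp [hc, pvRegroupStep]
  · rw [Bool.not_eq_true] at hc
    simp [hc, pvRegroupStep, PySem.Dict.getD_insert_self, PySem.Dict.insert_insert_self,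
          PySem.Dict.getD_of_not_contains _ _ hc]

theorem pv_insert_comm {κ ν : Type} [BEq κ] [LawfulBEq κ] (d : PySem.Dict κ ν) (k k' : κ) (v w : ν)
    (hk : d.contains k = true) (hne : k ≠ k') :
    (d.insert k v).insert k' w = (d.insert k' w).insert k v := by
  have hik : (d.insert k' w).contains k = true := by
    rw [PySem.Dict.contains_insert]; simp [hk]
  by_cases hk' : d.contains k' = true
  · have hik' : (d.insert k v).contains k' = true := by
      rw [PySem.Dict.contains_insert]; simp [hk']
    apply PySem.Dict.ext
    rw [PySem.Dict.items_insert_of_contains _ _ hik', PySem.Dict.items_insert_of_contains _ _ hk,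
        PySem.Dict.items_insert_of_contains _ _ hik, PySem.Dict.items_insert_of_contains _ _ hk',
        List.map_map, List.map_map]
    apply List.map_congr_left
    intro p _
    simp only [Function.comp]
    by_cases h1 : p.1 = k <;> by_cases h2 : p.1 = k' <;>
      simp_all [Ne.symm hne]
  · rw [Bool.not_eq_true] at hk'
    have hik' : (d.insert k v).contains k' = false := by
      rw [PySem.Dict.contains_insert]; simp [hk', Ne.symm hne]
    apply PySem.Dict.ext
    rw [PySem.Dict.items_insert_of_not_contains _ _ hik', PySem.Dict.items_insert_of_contains _ _ hk,
        PySem.Dict.items_insert_of_contains _ _ hik, PySem.Dict.items_insert_of_not_contains _ _ hk',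
        List.map_append]
    simp [Ne.symm hne]

theorem pv_persist (L : List ((String × String) × Int)) (c a : String) :
    ∀ R, (c, a) ∉ L.map (·.1) →
      ((L.foldl pvRegroupStep R).getD c PySem.Dict.empty).get? a = ((R.getD c PySem.Dict.empty).get? a) := by
  induction L with
  | nil => intro R _; rfl
  | cons q L ih =>
    intro R hmem
    simp only [List.map_cons, List.mem_cons, not_or] at hmem
    rw [List.foldl_cons, ih _ hmem.2]
    simp only [pvRegroupStep]
    by_cases h1 : q.1.1 = c
    · have h2 : q.1.2 ≠ a := by
        intro h; exact hmem.1 (Prod.ext_iff.mpr ⟨h1.symm, h.symm⟩)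
      rw [h1, PySem.Dict.getD_insert_self, PySem.Dict.get?_insert_of_ne _ _ (Ne.symm h2)]
    · rw [PySem.Dict.getD_insert_of_ne _ _ _ (Ne.symm h1)]

theorem pv_value (L : List ((String × String) × Int)) (c a : String) (v : Int) :
    ∀ R, (L.map (·.1)).Nodup → ((c, a), v) ∈ L →
      ((L.foldl pvRegroupStep R).getD c PySem.Dict.empty).get? a = some v := by
  induction L with
  | nil => intro R _ h; simp at h
  | cons q L ih =>
    intro R hnd hmem
    simp only [List.map_cons, List.nodup_cons] at hnd
    rcases List.mem_cons.mp hmem with h | h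
    · rw [List.foldl_cons, pv_persist _ _ _ _ (by rw [← h] at hnd; simpa using hnd.1)]
      rw [← h]
      simp [pvRegroupStep, PySem.Dict.getD_insert_self, PySem.Dict.get?_insert_self]
    · exact ih _ hnd.2 h

theorem pv_step_comm (R : PySem.Dict String (PySem.Dict String Int)) (p : String × String) (w : Int)
    (q : (String × String) × Int) (hne : q.1 ≠ p)
    (hc : ((R.getD p.1 PySem.Dict.empty).contains p.2) = true) :
    pvRegroupStep (pvSetp R p w) q = pvSetp (pvRegroupStep R q) p w := by
  have hRc : R.contains p.1 = true := by
    by_contra h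
    rw [Bool.not_eq_true] at h
    rw [PySem.Dict.getD_of_not_contains _ _ h, PySem.Dict.contains_empty] at hc
    exact Bool.false_ne_true hc
  by_cases h1 : q.1.1 = p.1
  · have h2 : q.1.2 ≠ p.2 := fun h => hne (Prod.ext_iff.mpr ⟨h1, h⟩)
    simp only [pvRegroupStep, pvSetp, h1, PySem.Dict.getD_insert_self,
               PySem.Dict.insert_insert_self]
    rw [pv_insert_comm _ _ _ _ _ hc (Ne.symm h2)]
  · simp only [pvRegroupStep, pvSetp,
               PySem.Dict.getD_insert_of_ne _ _ _ (Ne.symm h1),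
               PySem.Dict.getD_insert_of_ne _ _ _ h1]
    rw [pv_insert_comm _ _ _ _ _ hRc (Ne.symm h1)]

theorem pv_comm (L : List ((String × String) × Int)) (p : String × String) (w : Int) :
    ∀ R, p ∉ L.map (·.1) → ((R.getD p.1 PySem.Dict.empty).contains p.2) = true →
      L.foldl pvRegroupStep (pvSetp R p w) = pvSetp (L.foldl pvRegroupStep R) p w := by
  induction L with
  | nil => intro R _ _; rfl
  | cons q L ih =>
    intro R hmem hc
    simp only [List.map_cons, List.mem_cons, not_or] at hmem
    rw [List.foldl_cons, List.foldl_cons, pv_step_comm _ _ _ _ (Ne.symm hmem.1) hc]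
    apply ih _ hmem.2
    simp only [pvRegroupStep]
    by_cases h1 : q.1.1 = p.1
    · rw [h1, PySem.Dict.getD_insert_self, PySem.Dict.contains_insert]
      simp [hc]
    · rw [PySem.Dict.getD_insert_of_ne _ _ _ (Ne.symm h1)]
      exact hc

theorem pv_map_replace (L : List ((String × String) × Int)) (p : String × String) (w : Int) :
    ∀ R, (L.map (·.1)).Nodup → p ∈ L.map (·.1) →
      (L.map (fun q => if q.1 == p then (p, w) else q)).foldl pvRegroupStep R
        = pvSetp (L.foldl pvRegroupStep R) p w := by
  induction L with
  | nil => intro R _ h; simp at h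
  | cons q L ih =>
    intro R hnd hp
    simp only [List.map_cons, List.nodup_cons] at hnd
    by_cases hq : q.1 = p
    · have hpnotin : p ∉ L.map (·.1) := by rw [← hq]; exact hnd.1
      have hmap : L.map (fun q' => if q'.1 == p then (p, w) else q') = L := by
        conv_rhs => rw [← List.map_id L]
        apply List.map_congr_left
        intro x hx
        have : x.1 ≠ p := fun h => hpnotin (h ▸ List.mem_map_of_mem hx)
        simp [this]
      simp only [List.map_cons, hq, beq_self_eq_true, if_true, List.foldl_cons, hmap]
      have hstep : pvRegroupStep R (p, w) = pvSetp (pvRegroupStep R q) p w := by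
        simp only [pvRegroupStep, pvSetp, hq, PySem.Dict.getD_insert_self,
                   PySem.Dict.insert_insert_self]
      rw [hstep]
      apply pv_comm _ _ _ _ hpnotin
      simp only [pvRegroupStep, hq, PySem.Dict.getD_insert_self, PySem.Dict.contains_insert]
      simp
    · have hp' : p ∈ L.map (·.1) := by
        rcases List.mem_map.mp hp with ⟨x, hx, hfx⟩
        rcases List.mem_cons.mp hx with h | h
        · exact absurd (h ▸ hfx) hq
        · exact hfx ▸ List.mem_map_of_mem h
      have hbeq : (q.1 == p) = false := by simp [hq]
      simp only [List.map_cons, hbeq, Bool.false_eq_true, if_false, List.foldl_cons]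
      exact ih _ hnd.2 hp'

theorem pv_crux (F : PySem.Dict (String × String) Int) (p : String × String)
    (hnd : F.keys.Nodup) :
    (pvFlatStep F p).items.foldl pvRegroupStep PySem.Dict.empty
      = pvBump (F.items.foldl pvRegroupStep PySem.Dict.empty) p := by
  have hkeys : F.keys = F.items.map (·.1) := rfl
  by_cases hc : F.contains p = true
  · obtain ⟨n, hn⟩ : ∃ n, F.get? p = some n := by
      cases h : F.get? p with
      | none =>
        exact absurd ((PySem.Dict.contains_iff_mem_keys F p).mp hc)
          ((PySem.Dict.get?_eq_none_iff_not_mem_keys F p).mp h)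
      | some n => exact ⟨n, rfl⟩
    have hgD : F.getD p 0 = n := PySem.Dict.getD_of_get?_eq_some _ _ hn
    have hmemitems : (p, n) ∈ F.items := PySem.Dict.mem_items_of_get?_eq_some _ hn
    have hndi : (F.items.map (·.1)).Nodup := hkeys ▸ hnd
    have hpmem : p ∈ F.items.map (·.1) := List.mem_map_of_mem hmemitems
    have hIv : ((F.items.foldl pvRegroupStep PySem.Dict.empty).getD p.1 PySem.Dict.empty).get? p.2
        = some n := pv_value _ _ _ _ _ hndi (by simpa using hmemitems)
    have hitems : (pvFlatStep F p).items
        = F.items.map (fun q => if q.1 == p then (p, F.getD p 0 + 1) else q) :=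
      PySem.Dict.items_insert_of_contains _ _ hc
    rw [hitems, pv_map_replace _ _ _ _ hndi hpmem]
    simp only [pvBump, pvBumpI, pvSetp, hgD,
      PySem.Dict.getD_eq_get?_getD _ p.2, hIv, Option.getD_some]
  · rw [Bool.not_eq_true] at hc
    have hpnot : p ∉ F.items.map (·.1) := by
      rw [← hkeys]
      intro h
      rw [(PySem.Dict.contains_iff_mem_keys F p).mpr h] at hc
      simp at hc
    have hitems : (pvFlatStep F p).items = F.items ++ [(p, F.getD p 0 + 1)] :=
      PySem.Dict.items_insert_of_not_contains _ _ hc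
    have hgD : F.getD p 0 = 0 := PySem.Dict.getD_of_not_contains _ _ hc
    have hIv : ((F.items.foldl pvRegroupStep PySem.Dict.empty).getD p.1 PySem.Dict.empty).get? p.2
        = none := by
      rw [pv_persist _ _ _ _ (by simpa using hpnot)]
      simp [PySem.Dict.getD_empty, PySem.Dict.get?_empty]
    rw [hitems, List.foldl_append, hgD]
    simp only [List.foldl_cons, List.foldl_nil, pvRegroupStep, pvBump, pvBumpI,
      PySem.Dict.getD_eq_get?_getD _ p.2, hIv, Option.getD_none]

theorem pv_main (ps : List (String × String)) :
    ∀ F : PySem.Dict (String × String) Int, F.keys.Nodup →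
      ps.foldl pvBump (F.items.foldl pvRegroupStep PySem.Dict.empty)
        = (ps.foldl pvFlatStep F).items.foldl pvRegroupStep PySem.Dict.empty := by
  induction ps with
  | nil => intro F _; rfl
  | cons p ps ih =>
    intro F hnd
    rw [List.foldl_cons, List.foldl_cons, ← pv_crux F p hnd]
    exact ih _ (PySem.Dict.nodup_keys_insert _ _ _ hnd)


-- ===== VERDICT (by name: the statement is the Claim_ definition above) =====
theorem organize_voters_spec : Claim_equal_organize_voters := by
  intro voters _ hpre
  obtain ⟨hnodup, hkv⟩ := hpre
  have hexists : ∀ kv ∈ voters, (PySem.Dict.mk voters).get? kv.1 = some kv.2 ∧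
      (PySem.Dict.mk kv.2).get? "county" = some (pvExt kv).1 ∧
      (PySem.Dict.mk kv.2).get? "age" = some (pvExt kv).2 := by
    intro kv hkvmem
    refine ⟨PySem.Dict.get?_of_mem_items _ hkvmem (by simpa [PySem.Dict.keys_mk] using hnodup), ?_, ?_⟩
    · have hne : (PySem.Dict.mk kv.2).get? "county" ≠ none := by
        rw [Ne, PySem.Dict.get?_eq_none_iff_not_mem_keys]
        simpa [PySem.Dict.keys_mk] using (hkv kv hkvmem).1
      obtain ⟨c, hc⟩ := Option.ne_none_iff_exists'.mp hne
      simp [pvExt, hc]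
    · have hne : (PySem.Dict.mk kv.2).get? "age" ≠ none := by
        rw [Ne, PySem.Dict.get?_eq_none_iff_not_mem_keys]
        simpa [PySem.Dict.keys_mk] using (hkv kv hkvmem).2
      obtain ⟨a, ha⟩ := Option.ne_none_iff_exists'.mp hne
      simp [pvExt, ha]
  unfold Spec_organize_voters organize_voters organize_voters_alt
  simp only []
  congr 1
  trans ((voters.map pvExt).foldl pvBump PySem.Dict.empty).items
  · congr 1
    rw [List.foldl_map]
    refine PySem.List.foldl_congr_mem voters _ _ PySem.Dict.empty ?_
    intro acc kv hkvmem
    obtain ⟨hv, hc, ha⟩ := hexists kv hkvmem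
    simp only [hv, hc, ha]
    exact pv_stepA_eq_bump acc (pvExt kv).1 (pvExt kv).2
  · congr 1
    trans (List.foldl pvRegroupStep PySem.Dict.empty
        (List.foldl pvFlatStep PySem.Dict.empty (voters.map pvExt)).items)
    · exact pv_main (voters.map pvExt) PySem.Dict.empty PySem.Dict.nodup_keys_empty
    · rw [List.foldl_map]
      congr 1
      · funext acc q
        exact (pv_stepB_eq_regroupStep acc q).symm
      · congr 1
        refine (PySem.List.foldl_congr_mem voters _ _ PySem.Dict.empty ?_).symm
        intro acc kv hkvmem
        obtain ⟨_, hc, ha⟩ := hexists kv hkvmem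
        simp only [hc, ha, pvFlatStep]
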